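-- pv_equiv track=rewrite | github.com/harrym1008/Graphulator | standardform.py | StringToSuperscript
-- ===== SOURCE A (Python) =====
-- SUPERSCRIPT = "⁰¹²³⁴⁵⁶⁷⁸⁹⁻"  # ⁺⁻⁼⁽⁾"
--
-- def StringToSuperscript(n: int) -> str:
--     string = ""
--
--     for i in range(len(str(n))):
--         if str(n)[i] == "-":
--             string += SUPERSCRIPT[10]
--             continue
--
--         string += SUPERSCRIPT[int(str(n)[i])]
--
--     return string
-- ===== SOURCE B (Python) =====
-- SUPERSCRIPT = "⁰¹²³⁴⁵⁶⁷⁸⁹⁻"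
--
-- def StringToSuperscript(n: int) -> str:
--     m = abs(n)
--     glyphs = []
--     while True:
--         m, r = divmod(m, 10)
--         glyphs.append(SUPERSCRIPT[r])
--         if m == 0:
--             break
--     glyphs.reverse()
--     sign = SUPERSCRIPT[10] if n < 0 else ""
--     return sign + "".join(glyphs)
-- ===== Notes on version B (the rewrite author's own statement) =====
-- stated objective: alternative
-- what changed: B extracts digits arithmetically with divmod (least-significant first, then reversed) instead of iterating over the characters of str(n), calling str(n) and int() per index; no string parsing at all.
import Mathlib
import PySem

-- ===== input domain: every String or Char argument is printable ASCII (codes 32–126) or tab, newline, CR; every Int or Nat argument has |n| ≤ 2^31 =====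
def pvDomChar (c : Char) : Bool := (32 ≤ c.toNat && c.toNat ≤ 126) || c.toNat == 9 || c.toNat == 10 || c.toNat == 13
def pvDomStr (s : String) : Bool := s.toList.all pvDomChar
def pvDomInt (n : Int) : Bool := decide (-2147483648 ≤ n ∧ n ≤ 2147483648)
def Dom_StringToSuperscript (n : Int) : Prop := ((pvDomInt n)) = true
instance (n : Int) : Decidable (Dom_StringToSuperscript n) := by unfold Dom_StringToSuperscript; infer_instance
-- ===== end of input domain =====

-- B converts the integer to superscript glyphs by peeling digits arithmetically with divmod
-- instead of A's per-index re-stringification str(n)[i]/int(); alternative decomposition, same result.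

-- ===== PORT A =====
-- SUPERSCRIPT = "⁰¹²³⁴⁵⁶⁷⁸⁹⁻"
def pvSupA : List Char := "⁰¹²³⁴⁵⁶⁷⁸⁹⁻".toList

-- literal transliteration: for i in range(len(str(n))): branch on str(n)[i] == "-",
-- else index SUPERSCRIPT by int(str(n)[i]).  pyGetD defaults / .getD 0 only guard
-- index/parse failures Python never reaches on these strings.
def StringToSuperscript (n : Int) : String :=
  let s := (PySem.Int.toStr n).toList
  String.ofList <|
    (PySem.List.pyRange 0 (s.length : Int) 1).foldl
      (fun string i =>
        if PySem.List.pyGetD s i ' ' = '-' then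
          string ++ [PySem.List.pyGetD pvSupA 10 ' ']
        else
          string ++
            [PySem.List.pyGetD pvSupA
              ((PySem.Int.ofStr? (String.ofList [PySem.List.pyGetD s i ' '])).getD 0) ' ']) []

-- ===== PORT B =====
def pvSupB : List Char := "⁰¹²³⁴⁵⁶⁷⁸⁹⁻".toList

-- the divmod loop of Source B: append SUPERSCRIPT[m % 10], continue with m // 10 until it is 0
def pvPeel (m : Nat) (glyphs : List Char) : List Char :=
  let r := m % 10
  let glyphs' := glyphs ++ [pvSupB.getD r ' ']
  if h : m / 10 = 0 then glyphs'
  else pvPeel (m / 10) glyphs'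
decreasing_by exact Nat.div_lt_self (Nat.pos_of_ne_zero (fun h0 => h (by simp [h0]))) (by norm_num)

def StringToSuperscript_alt (n : Int) : String :=
  let glyphs := (pvPeel n.natAbs []).reverse
  let sign := if n < 0 then [pvSupB.getD 10 ' '] else []
  String.ofList (sign ++ glyphs)

-- ===== PRECONDITION & SPEC =====
def Spec_StringToSuperscript (n : Int) (out : String) : Prop := out = StringToSuperscript_alt n
instance (n : Int) (out : String) : Decidable (Spec_StringToSuperscript n out) := by unfold Spec_StringToSuperscript; infer_instance

-- ===== CLAIM (what is proved, stated in full; the proofs are below) =====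
def Claim_equal_StringToSuperscript : Prop := ∀ (n : Int), Dom_StringToSuperscript n → Spec_StringToSuperscript n (StringToSuperscript n)

-- ===== LEMMAS AND PROOFS =====

-- A's per-character conversion, extracted
def pvConv (c : Char) : Char :=
  if c = '-' then PySem.List.pyGetD pvSupA 10 ' '
  else PySem.List.pyGetD pvSupA ((PySem.Int.ofStr? (String.ofList [c])).getD 0) ' '

-- reference: superscript digits of m, most significant first
def pvSupRef (m : Nat) : List Char :=
  if _h : m < 10 then [pvSupB.getD m ' ']
  else pvSupRef (m / 10) ++ [pvSupB.getD (m % 10) ' ']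
decreasing_by exact Nat.div_lt_self (by omega) (by norm_num)

theorem pvConv_digit (d : Nat) (hd : d < 10) : pvConv (Nat.digitChar d) = pvSupB.getD d ' ' := by
  interval_cases d <;> decide

theorem foldl_append_conv (xs : List Char) (acc : List Char) :
    xs.foldl (fun string c =>
        if c = '-' then string ++ [PySem.List.pyGetD pvSupA 10 ' ']
        else string ++
          [PySem.List.pyGetD pvSupA ((PySem.Int.ofStr? (String.ofList [c])).getD 0) ' ']) acc
      = acc ++ xs.map pvConv := by
  induction xs generalizing acc with
  | nil => simp
  | cons c xs ih =>
    simp only [List.foldl_cons, List.map_cons, ih]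
    by_cases hc : c = '-' <;> simp [pvConv, hc]

theorem toDigitsCore_acc (f n : Nat) (ds : List Char) :
    Nat.toDigitsCore 10 f n ds = Nat.toDigitsCore 10 f n [] ++ ds := by
  induction f generalizing n ds with
  | zero => simp [Nat.toDigitsCore]
  | succ f ih =>
    simp only [Nat.toDigitsCore]
    by_cases h : n / 10 = 0
    · simp [h]
    · simp only [if_neg h]
      rw [ih (n / 10) (Nat.digitChar (n % 10) :: ds), ih (n / 10) [Nat.digitChar (n % 10)]]
      simp

theorem tdc_supRef (f : Nat) : ∀ n, n < 10 ^ f → 1 ≤ f →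
    (Nat.toDigitsCore 10 f n []).map pvConv = pvSupRef n := by
  induction f with
  | zero => intro n _ hf; omega
  | succ k ih =>
    intro n hn _
    simp only [Nat.toDigitsCore]
    by_cases h : n / 10 = 0
    · have hn10 : n < 10 := by omega
      simp only [h, if_true]
      rw [pvSupRef, dif_pos hn10]
      simp [Nat.mod_eq_of_lt hn10, pvConv_digit n hn10, List.getD]
    · have hge : 10 ≤ n := by omega
      have hk : 1 ≤ k := by
        by_contra hk0
        have : k = 0 := by omega
        subst this; simp at hn; omega
      have hdiv : n / 10 < 10 ^ k := by
        have := Nat.pow_succ 10 k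
        exact Nat.div_lt_of_lt_mul (by omega)
      simp only [if_neg h]
      rw [toDigitsCore_acc]
      rw [List.map_append, ih (n / 10) hdiv hk]
      conv_rhs => rw [pvSupRef, dif_neg (by omega : ¬ n < 10)]
      simp [pvConv_digit (n % 10) (Nat.mod_lt n (by norm_num))]

theorem map_conv_toDigits (m : Nat) : (Nat.toDigits 10 m).map pvConv = pvSupRef m := by
  have hm : m < 10 ^ (m + 1) := by
    calc m < 10 ^ m := Nat.lt_pow_self (by norm_num)
    _ ≤ 10 ^ (m + 1) := Nat.pow_le_pow_right (by norm_num) (by omega)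
  exact tdc_supRef (m + 1) m hm (by omega)

theorem pvPeel_eq (m : Nat) (acc : List Char) :
    pvPeel m acc = acc ++ (pvSupRef m).reverse := by
  induction m using Nat.strong_induction_on generalizing acc with
  | _ m ih =>
    rw [pvPeel]
    by_cases h : m / 10 = 0
    · have hm10 : m < 10 := by omega
      simp only [dif_pos h]
      rw [pvSupRef, dif_pos hm10, Nat.mod_eq_of_lt hm10]
      simp
    · have hlt : m / 10 < m := Nat.div_lt_self (by omega) (by norm_num)
      simp only [dif_neg h]
      rw [ih (m / 10) hlt]
      conv_rhs => rw [pvSupRef, dif_neg (by omega : ¬ m < 10)]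
      simp

theorem conv_dash : pvConv '-' = pvSupB.getD 10 ' ' := by decide

-- ===== VERDICT (by name: the statement is the Claim_ definition above) =====
theorem StringToSuperscript_spec : Claim_equal_StringToSuperscript := by
  intro n _
  unfold Spec_StringToSuperscript StringToSuperscript StringToSuperscript_alt
  dsimp only
  rw [PySem.List.foldl_pyRange_zero_pyGetD' (PySem.Int.toStr n).toList ' '
      (fun string c =>
        if c = '-' then string ++ [PySem.List.pyGetD pvSupA 10 ' ']
        else string ++
          [PySem.List.pyGetD pvSupA ((PySem.Int.ofStr? (String.ofList [c])).getD 0) ' ']) []]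
  rw [foldl_append_conv, PySem.Int.toList_toStr, pvPeel_eq]
  by_cases hneg : n < 0
  · simp only [PySem.Int.toChars, if_pos hneg, List.map_cons, List.nil_append,
      conv_dash, map_conv_toDigits, List.reverse_reverse, List.singleton_append]
  · have habs : n.toNat = n.natAbs := by omega
    simp only [PySem.Int.toChars, if_neg hneg, List.nil_append, habs,
      map_conv_toDigits, List.reverse_reverse]
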